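-- pv_equiv track=rewrite | github.com/bpiv400/eBay | rnn/make_seqs.py | get_targ_lists
-- ===== SOURCE A (Python) =====
-- def all_offr_codes(offr_code):
--     '''
--     Description: Generates a list of offer codes for all offers
--     preceeding the offer given by 'offr_code', including that
--     offer itself
--     Input: String denoting last offer code to be generated
--     Returns: list of strings
--     '''
--     out = []
--     # check correct format of offr_code
--     if len(offr_code) != 2:
--         raise ValueError('offr code should have length 2')
--     #  extract turn type and num
--     turn_num = int(offr_code[1])
--     turn_type = offr_code[0]
--     # iterate to (inclusive) turn_num
--     for i in range(turn_num + 1):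
--         # add all buyer turns up to and including the current turn
--         # to the list
--         out.append('b%d' % i)
--         # do not add the seller turn for the last round if
--         # the last turn is a buyer turn
--         if i < turn_num or turn_type == 's':
--             out.append('s%d' % i)
--     return out
--
-- def get_targ_lists(concat=False, sep=False, b3=False, time_mod=False):
--     '''
--     Extract target columns in order as a list of
--     single-item lists
--
--     For concatenation or separation, include only seller
--     offers as the targets. Otherwise, include both
--     '''
--     if b3:
--         # grab all target codes through b3
--         targ_codes = all_offr_codes('b3')
--         # drop b0
--         targ_codes.remove('b0')
--     else:
--         # grab all offer codes through s2
--         targ_codes = all_offr_codes('s2')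
--         # drop b0
--         targ_codes.remove('b0')
--     if sep or concat:
--         # drop all buyer offers
--         targ_codes = [code for code in targ_codes if 's' in code]
--     # add offer prefix to each
--     targ_codes = ['offr_%s' % code for code in targ_codes]
--     # give each offr its own list to match seq_lists format
--     targ_codes = [[offr] for offr in targ_codes]
--     return targ_codes
-- ===== SOURCE B (Python) =====
-- def get_targ_lists(concat=False, sep=False, b3=False, time_mod=False):
--     # closed-form: the generator's output through s2 (or b3) minus b0
--     codes = ['s0', 'b1', 's1', 'b2', 's2'] + (['b3'] if b3 else [])
--     if sep or concat:
--         codes = [c for c in codes if 's' in c]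
--     return [['offr_%s' % c] for c in codes]
-- ===== Notes on version B (the rewrite author's own statement) =====
-- stated objective: simpler
-- what changed: B replaces the interleaved generation loop (all_offr_codes) plus post-hoc list.remove('b0') with a direct closed-form constant list of codes, then applies the same seller filter and prefix/wrap.
import Mathlib
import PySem

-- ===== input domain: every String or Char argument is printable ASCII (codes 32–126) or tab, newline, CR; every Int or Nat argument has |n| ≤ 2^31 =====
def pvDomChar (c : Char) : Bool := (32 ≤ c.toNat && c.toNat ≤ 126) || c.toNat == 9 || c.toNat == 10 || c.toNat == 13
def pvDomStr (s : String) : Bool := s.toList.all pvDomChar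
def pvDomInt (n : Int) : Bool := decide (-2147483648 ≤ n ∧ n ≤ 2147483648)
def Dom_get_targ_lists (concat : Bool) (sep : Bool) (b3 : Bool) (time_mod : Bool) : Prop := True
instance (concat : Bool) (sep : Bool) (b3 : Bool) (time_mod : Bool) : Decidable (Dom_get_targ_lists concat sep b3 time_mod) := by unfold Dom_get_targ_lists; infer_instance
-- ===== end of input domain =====

-- B builds the base code list in closed form instead of A's generation loop + remove; objective: simpler.

-- ===== PORT A =====
-- all_offr_codes: Option models the raises (ValueError on bad length / non-digit);
-- get_targ_lists only calls it with "b3"/"s2", where it always returns some.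
def all_offr_codes (offr_code : String) : Option (List String) :=
  if offr_code.toList.length ≠ 2 then none
  else
    match PySem.Str.pyGet? offr_code 1 with
    | none => none
    | some c1 =>
      match PySem.Int.ofStr? (String.mk [c1]) with
      | none => none
      | some turn_num =>
        match PySem.Str.pyGet? offr_code 0 with
        | none => none
        | some turn_type =>
          some ((PySem.List.pyRange 0 (turn_num + 1) 1).foldl
            (fun out i =>
              let out := out ++ ["b" ++ PySem.Int.toStr i]
              if i < turn_num || turn_type == 's' then out ++ ["s" ++ PySem.Int.toStr i]
              else out) [])

def get_targ_lists (concat : Bool) (sep : Bool) (b3 : Bool) (time_mod : Bool) : List (List String) :=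
  -- the .getD [] defaults and the remove 'b0' default are unreachable: the literal calls never raise
  let targ_codes :=
    if b3 then
      let tc := (all_offr_codes "b3").getD []
      (PySem.List.remove? tc "b0").getD []
    else
      let tc := (all_offr_codes "s2").getD []
      (PySem.List.remove? tc "b0").getD []
  let targ_codes := if sep || concat then targ_codes.filter (fun code => PySem.Str.isIn "s" code) else targ_codes
  let targ_codes := targ_codes.map (fun code => "offr_" ++ code)
  targ_codes.map (fun offr => [offr])

-- ===== PORT B =====
def get_targ_lists_alt (concat : Bool) (sep : Bool) (b3 : Bool) (time_mod : Bool) : List (List String) :=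
  let codes := ["s0", "b1", "s1", "b2", "s2"] ++ (if b3 then ["b3"] else [])
  let codes := if sep || concat then codes.filter (fun c => PySem.Str.isIn "s" c) else codes
  codes.map (fun c => ["offr_" ++ c])

-- ===== PRECONDITION & SPEC =====
def Spec_get_targ_lists (concat : Bool) (sep : Bool) (b3 : Bool) (time_mod : Bool) (out : List (List String)) : Prop := out = get_targ_lists_alt concat sep b3 time_mod
instance (concat : Bool) (sep : Bool) (b3 : Bool) (time_mod : Bool) (out : List (List String)) : Decidable (Spec_get_targ_lists concat sep b3 time_mod out) := by unfold Spec_get_targ_lists; infer_instance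

-- ===== CLAIM (what is proved, stated in full; the proofs are below) =====
def Claim_equal_get_targ_lists : Prop := ∀ (concat : Bool) (sep : Bool) (b3 : Bool) (time_mod : Bool), Dom_get_targ_lists concat sep b3 time_mod → Spec_get_targ_lists concat sep b3 time_mod (get_targ_lists concat sep b3 time_mod)

-- ===== LEMMAS AND PROOFS =====

-- ===== VERDICT (by name: the statement is the Claim_ definition above) =====
theorem get_targ_lists_spec : Claim_equal_get_targ_lists := by
  unfold Claim_equal_get_targ_lists
  decide
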